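-- pv_equiv track=rewrite | github.com/linhdvu14/cp-sols | sols/CodeForces/1816_d2/B_Grid_Reconstruction.py | solve
-- ===== SOURCE A (Python) =====
-- def solve(N):
--     res = [[-1] * N for _ in range(2)]
--     res[0][0] = 2 * N - 1
--     res[-1][-1] = 2 * N
--
--     l, r = 1, N + 1
--     for i in range(1, N):
--         if i % 2 == 1:
--             res[0][i] = l
--             res[1][i - 1] = l + 1
--             l += 2
--         else:
--             res[0][i] = r
--             res[1][i - 1] = r + 1
--             r += 2
--
--     return res
-- ===== SOURCE B (Python) =====
-- def solve(N):
--     # closed-form per-column construction: no l/r accumulators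
--     top = [2 * N - 1] + [j if j % 2 == 1 else N - 1 + j for j in range(1, N)]
--     bot = [j + 2 if j % 2 == 0 else N + j + 1 for j in range(N - 1)] + [2 * N]
--     return [top, bot]
-- ===== Notes on version B (the rewrite author's own statement) =====
-- stated objective: simpler
-- what changed: Replaced the stateful pass threading l/r accumulators and in-place cell assignments with two per-row comprehensions that compute every cell directly from its column index by a parity closed form.
-- outside the precondition, e.g. on solve(0): A raises IndexError, B returns [[-1], [0]]
import Mathlib
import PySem

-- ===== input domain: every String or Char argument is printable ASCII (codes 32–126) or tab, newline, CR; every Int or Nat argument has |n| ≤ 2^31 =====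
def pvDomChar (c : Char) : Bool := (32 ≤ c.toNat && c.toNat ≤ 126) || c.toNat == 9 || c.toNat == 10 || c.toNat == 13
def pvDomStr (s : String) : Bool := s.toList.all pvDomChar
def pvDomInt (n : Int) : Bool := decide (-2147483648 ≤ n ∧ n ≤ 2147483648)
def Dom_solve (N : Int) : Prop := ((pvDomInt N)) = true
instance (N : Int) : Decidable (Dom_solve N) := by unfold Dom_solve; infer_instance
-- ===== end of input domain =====

-- B builds each row by a per-column parity closed form instead of A's sequential l/r accumulator pass (objective: simpler).

-- ===== PORT A =====
def solve (N : Int) : List (List Int) :=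
  let res0 := List.replicate N.toNat (-1 : Int)
  let res1 := List.replicate N.toNat (-1 : Int)
  let res0 := PySem.List.pySetD res0 0 (2 * N - 1)
  let res1 := PySem.List.pySetD res1 (-1) (2 * N)
  let s := (PySem.List.pyRange 1 N 1).foldl
    (fun (s : (List Int × List Int) × Int × Int) i =>
      let r0 := s.1.1
      let r1 := s.1.2
      let l := s.2.1
      let r := s.2.2
      if PySem.Int.mod i 2 == 1 then
        ((PySem.List.pySetD r0 i l, PySem.List.pySetD r1 (i - 1) (l + 1)), l + 2, r)
      else
        ((PySem.List.pySetD r0 i r, PySem.List.pySetD r1 (i - 1) (r + 1)), l, r + 2))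
    ((res0, res1), 1, N + 1)
  [s.1.1, s.1.2]

-- ===== PORT B =====
def solve_alt (N : Int) : List (List Int) :=
  let top := (2 * N - 1) ::
    (PySem.List.pyRange 1 N 1).map (fun j => if PySem.Int.mod j 2 == 1 then j else N - 1 + j)
  let bot :=
    ((PySem.List.pyRange 0 (N - 1) 1).map (fun j => if PySem.Int.mod j 2 == 0 then j + 2 else N + j + 1))
    ++ [2 * N]
  [top, bot]

-- ===== PRECONDITION & SPEC =====
-- Pre_ excludes N ≤ 0, on which A raises IndexError (res[0][0] = … on an empty row).
def Pre_solve (N : Int) : Prop := 1 ≤ N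
instance (N : Int) : Decidable (Pre_solve N) := by unfold Pre_solve; infer_instance
def pvWitness_solve : Int := 3
def Spec_solve (N : Int) (out : List (List Int)) : Prop := out = solve_alt N
instance (N : Int) (out : List (List Int)) : Decidable (Spec_solve N out) := by unfold Spec_solve; infer_instance

-- ===== CLAIM (what is proved, stated in full; the proofs are below) =====
def Claim_equal_solve : Prop := ∀ (N : Int), Dom_solve N → Pre_solve N → Spec_solve N (solve N)

-- ===== LEMMAS AND PROOFS =====

-- closed form of A's top row after the loop has processed columns 1 .. k-1
def gTop (N : Int) (k : Nat) (j : Nat) : Int :=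
  if j = 0 then 2 * N - 1
  else if j < k then (if j % 2 = 1 then (j : Int) else N - 1 + j)
  else -1

-- closed form of A's bottom row after the loop has processed columns 1 .. k-1
def gBot (N : Int) (k : Nat) (j : Nat) : Int :=
  if (j : Int) = N - 1 then 2 * N
  else if j + 1 < k then (if (j + 1) % 2 = 1 then (j : Int) + 2 else N + j + 1)
  else -1

lemma set_map_range {n j : Nat} (f : Nat → Int) (v : Int) :
    ((List.range n).map f).set j v = (List.range n).map (fun x => if x = j then v else f x) := by
  apply List.ext_getElem
  · simp
  · intro i h1 h2
    simp only [List.getElem_set, List.getElem_map, List.getElem_range]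
    rcases eq_or_ne i j with h3 | h3
    · simp [h3]
    · simp [h3, Ne.symm h3]

lemma map_range_succ_left (n : Nat) (f : Nat → Int) :
    (List.range (n+1)).map f = f 0 :: (List.range n).map (fun k => f (k+1)) := by
  rw [List.range_succ_eq_map]
  simp [List.map_map, Function.comp]

-- state of A's loop after processing i = 1 .. m: rows as closed forms, l and r as floor divisions
lemma loop_inv (N : Int) (hN : 1 ≤ N) (m : Nat) (hm : (m : Int) ≤ N - 1) :
    (PySem.List.pyRange 1 (1 + (m : Int)) 1).foldl
      (fun (s : (List Int × List Int) × Int × Int) i =>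
        let r0 := s.1.1
        let r1 := s.1.2
        let l := s.2.1
        let r := s.2.2
        if PySem.Int.mod i 2 == 1 then
          ((PySem.List.pySetD r0 i l, PySem.List.pySetD r1 (i - 1) (l + 1)), l + 2, r)
        else
          ((PySem.List.pySetD r0 i r, PySem.List.pySetD r1 (i - 1) (r + 1)), l, r + 2))
      (((List.range N.toNat).map (gTop N 1), (List.range N.toNat).map (gBot N 1)), 1, N + 1)
    = (((List.range N.toNat).map (gTop N (1 + m)), (List.range N.toNat).map (gBot N (1 + m))),
       2 * (((m + 1) / 2 : Nat) : Int) + 1, N + 1 + 2 * ((m / 2 : Nat) : Int)) := by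
  induction m with
  | zero =>
    rw [PySem.List.pyRange_one_eq_nil (by omega)]
    simp
  | succ m ih =>
    have hm' : (m : Int) ≤ N - 1 := by push_cast at hm ⊢; omega
    have hrng : PySem.List.pyRange 1 (1 + ((m:Nat)+1 : Nat)) 1
        = PySem.List.pyRange 1 (1 + (m : Int)) 1 ++ [1 + (m : Int)] := by
      push_cast
      rw [show (1 : Int) + ((m : Int) + 1) = (1 + (m:Int)) + 1 by ring]
      exact PySem.List.pyRange_one_succ_right (by omega)
    rw [hrng, List.foldl_append, ih hm']
    simp only [List.foldl_cons, List.foldl_nil]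
    have hcast : (1 : Int) + (m : Int) = ((1 + m : Nat) : Int) := by push_cast; ring
    have hidx : ((1 + m : Nat) : Int) - 1 = ((m : Nat) : Int) := by push_cast; ring
    have hlt : 1 + m < N.toNat := by omega
    have hmod : PySem.Int.mod ((1 + m : Nat) : Int) 2 = (((1 + m) % 2 : Nat) : Int) := by
      exact_mod_cast PySem.Int.mod_natCast (1 + m) 2
    rw [hcast, hmod, hidx]
    by_cases hp : (1 + m) % 2 = 1
    · rw [hp]
      simp only [Nat.cast_one, beq_self_eq_true, if_true, PySem.List.pySetD_natCast,
        set_map_range, Prod.mk.injEq]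
      refine ⟨⟨?_, ?_⟩, ?_, ?_⟩
      · apply List.map_congr_left
        intro x hx
        simp only [List.mem_range] at hx
        unfold gTop
        split_ifs <;> omega
      · apply List.map_congr_left
        intro x hx
        simp only [List.mem_range] at hx
        unfold gBot
        split_ifs <;> omega
      · omega
      · omega
    · have hp0 : (1 + m) % 2 = 0 := by omega
      rw [hp0]
      rw [if_neg (by decide)]
      simp only [PySem.List.pySetD_natCast, set_map_range, Prod.mk.injEq]
      refine ⟨⟨?_, ?_⟩, ?_, ?_⟩
      · apply List.map_congr_left
        intro x hx
        simp only [List.mem_range] at hx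
        unfold gTop
        split_ifs <;> omega
      · apply List.map_congr_left
        intro x hx
        simp only [List.mem_range] at hx
        unfold gBot
        split_ifs <;> omega
      · omega
      · omega

lemma init_top (N : Int) (hN : 1 ≤ N) :
    PySem.List.pySetD (List.replicate N.toNat (-1 : Int)) 0 (2 * N - 1)
      = (List.range N.toNat).map (gTop N 1) := by
  rw [show (0 : Int) = ((0 : Nat) : Int) by rfl, PySem.List.pySetD_natCast]
  apply List.ext_getElem
  · simp
  · intro i h1 h2
    simp only [List.getElem_set, List.getElem_replicate, List.getElem_map, List.getElem_range]
    unfold gTop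
    split_ifs <;> omega

lemma init_bot (N : Int) (hN : 1 ≤ N) :
    PySem.List.pySetD (List.replicate N.toNat (-1 : Int)) (-1) (2 * N)
      = (List.range N.toNat).map (gBot N 1) := by
  simp only [PySem.List.pySetD, PySem.List.pySet?, PySem.List.pyIdx?, List.length_replicate]
  rw [if_neg (by decide), if_pos (by omega)]
  simp only [Option.map_some, Option.getD_some]
  apply List.ext_getElem
  · simp
  · intro i hx1 hx2
    simp only [List.getElem_set, List.getElem_replicate, List.getElem_map, List.getElem_range]
    unfold gBot
    split_ifs <;> omega

lemma top_eq (N : Int) (hN : 1 ≤ N) :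
    (List.range N.toNat).map (gTop N N.toNat)
      = (2 * N - 1) ::
        (PySem.List.pyRange 1 N 1).map (fun j => if PySem.Int.mod j 2 == 1 then j else N - 1 + j) := by
  have hn : N.toNat = (N - 1).toNat + 1 := by omega
  rw [hn, map_range_succ_left, PySem.List.pyRange_one]
  congr 1
  · rw [List.map_map]
    apply List.map_congr_left
    intro k hk
    simp only [List.mem_range] at hk
    have hmod : PySem.Int.mod (1 + (k : Int)) 2 = (((1 + k) % 2 : Nat) : Int) := by
      rw [show (1 + (k : Int)) = ((1 + k : Nat) : Int) by push_cast; ring]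
      exact_mod_cast PySem.Int.mod_natCast (1 + k) 2
    simp only [Function.comp_apply, hmod]
    by_cases hp : (1 + k) % 2 = 1
    · rw [hp, if_pos (by decide)]
      unfold gTop
      split_ifs <;> first | omega | tauto
    · have hp0 : (1 + k) % 2 = 0 := by omega
      rw [hp0, if_neg (by decide)]
      unfold gTop
      split_ifs <;> first | omega | tauto

lemma bot_eq (N : Int) (hN : 1 ≤ N) :
    (List.range N.toNat).map (gBot N N.toNat)
      = ((PySem.List.pyRange 0 (N - 1) 1).map
          (fun j => if PySem.Int.mod j 2 == 0 then j + 2 else N + j + 1)) ++ [2 * N] := by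
  have hn : N.toNat = (N - 1).toNat + 1 := by omega
  rw [hn, List.range_succ, List.map_append, PySem.List.pyRange_one,
    show N - 1 - 0 = N - 1 by ring]
  congr 1
  · rw [List.map_map]
    apply List.map_congr_left
    intro k hk
    simp only [List.mem_range] at hk
    have hmod : PySem.Int.mod (0 + (k : Int)) 2 = ((k % 2 : Nat) : Int) := by
      rw [show (0 + (k : Int)) = ((k : Nat) : Int) by omega]
      exact_mod_cast PySem.Int.mod_natCast k 2
    simp only [Function.comp_apply, hmod]
    by_cases hp : k % 2 = 0
    · rw [hp, if_pos (by decide)]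
      unfold gBot
      split_ifs <;> omega
    · have hp1 : k % 2 = 1 := by omega
      rw [hp1, if_neg (by decide)]
      unfold gBot
      split_ifs <;> omega
  · simp only [List.map_cons, List.map_nil]
    unfold gBot
    rw [if_pos (by omega)]

-- ===== VERDICT (by name: the statement is the Claim_ definition above) =====
theorem solve_spec : Claim_equal_solve := by
  intro N _ hN
  unfold Pre_solve at hN
  unfold Spec_solve
  have hNm : N = 1 + (((N - 1).toNat : Nat) : Int) := by omega
  have hrange : PySem.List.pyRange 1 N 1
      = PySem.List.pyRange 1 (1 + (((N - 1).toNat : Nat) : Int)) 1 := by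
    rw [← hNm]
  simp only [solve, solve_alt]
  rw [init_top N hN, init_bot N hN, hrange, loop_inv N hN ((N - 1).toNat) (by omega)]
  have h1m : 1 + (N - 1).toNat = N.toNat := by omega
  rw [h1m, top_eq N hN, bot_eq N hN, ← hrange]
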